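-- pv_equiv track=rewrite | github.com/cryptomentor139-cell/cryptomentor-bot | Bismillah/app/admin_daily_report.py | _split_message_lines
-- ===== SOURCE A (Python) =====
-- def _split_message_lines(text: str, max_len: int = 3800) -> list[str]:
--     """
--     Split long Telegram messages safely by line boundaries.
--     Keeps HTML entities/tags intact per line and avoids 4096-char limit.
--     """
--     if len(text) <= max_len:
--         return [text]
--
--     chunks: list[str] = []
--     current_lines: list[str] = []
--     current_len = 0
--
--     for raw_line in text.splitlines(keepends=True):
--         line = raw_line
--
--         # Fallback: a single very long line still must be split.
--         while len(line) > max_len: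
--             head = line[:max_len]
--             tail = line[max_len:]
--             if current_lines:
--                 chunks.append("".join(current_lines).rstrip())
--                 current_lines = []
--                 current_len = 0
--             chunks.append(head.rstrip())
--             line = tail
--
--         line_len = len(line)
--         if current_lines and (current_len + line_len) > max_len:
--             chunks.append("".join(current_lines).rstrip())
--             current_lines = [line]
--             current_len = line_len
--         else:
--             current_lines.append(line)
--             current_len += line_len
--
--     if current_lines:
--         chunks.append("".join(current_lines).rstrip())
--
--     return chunks
-- ===== SOURCE B (Python) =====
-- def _split_message_lines(text: str, max_len: int = 3800) -> list[str]:
--     """Two-pass rewrite: first flatten the text into line fragments of at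
--     most max_len chars, then greedily pack the fragments into chunks."""
--     if len(text) <= max_len:
--         return [text]
--
--     atoms: list[str] = []
--     for raw_line in text.splitlines(keepends=True):
--         line = raw_line
--         while len(line) > max_len:
--             atoms.append(line[:max_len])
--             line = line[max_len:]
--         atoms.append(line)
--
--     chunks: list[str] = []
--     buf: list[str] = []
--     buf_len = 0
--     for atom in atoms:
--         if buf and buf_len + len(atom) > max_len:
--             chunks.append("".join(buf).rstrip())
--             buf = [atom]
--             buf_len = len(atom)
--         else:
--             buf.append(atom)
--             buf_len += len(atom)
--     if buf:
--         chunks.append("".join(buf).rstrip())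
--     return chunks
-- ===== Notes on version B (the rewrite author's own statement) =====
-- stated objective: alternative
-- what changed: A interleaves hard-splitting of over-long lines with flushing inside one loop; B is a two-pass decomposition: first flatten the text into a list of line fragments of at most max_len characters, then greedily pack those fragments into chunks.
import Mathlib
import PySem

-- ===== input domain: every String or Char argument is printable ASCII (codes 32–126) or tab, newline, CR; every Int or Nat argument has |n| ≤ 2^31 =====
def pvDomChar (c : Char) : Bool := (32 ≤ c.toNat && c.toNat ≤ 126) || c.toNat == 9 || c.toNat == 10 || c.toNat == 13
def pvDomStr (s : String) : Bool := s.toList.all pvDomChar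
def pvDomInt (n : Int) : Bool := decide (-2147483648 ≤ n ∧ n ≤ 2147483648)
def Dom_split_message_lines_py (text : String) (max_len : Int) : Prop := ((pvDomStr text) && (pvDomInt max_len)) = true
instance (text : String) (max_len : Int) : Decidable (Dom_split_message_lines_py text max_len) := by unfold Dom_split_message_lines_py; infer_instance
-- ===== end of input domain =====

-- B replaces A's interleaved while-loop/flush with two passes (flatten into ≤max_len
-- fragments, then greedily pack); objective: alternative decomposition, not faster.

-- ===== PORT A =====
-- Hand port of str.splitlines(keepends=True) (PySem.Chars.splitlines drops the endings):
-- exact on the stated domain, where the only line-break characters are '\n', '\r', "\r\n".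
-- Shared by both ports (it is the same Python builtin call in A and in B).
def pvBreakLine : List Char → List Char × List Char
  | [] => ([], [])
  | c :: r =>
    if c = '\n' then (['\n'], r)
    else if c = '\r' then
      (if r.head? = some '\n' then (['\r', '\n'], r.tail) else (['\r'], r))
    else
      let p := pvBreakLine r
      (c :: p.1, p.2)

theorem pvBreakLine_snd_le : ∀ (cs : List Char), (pvBreakLine cs).2.length ≤ cs.length := by
  intro cs
  induction cs with
  | nil => simp [pvBreakLine]
  | cons c r ih =>
    simp only [pvBreakLine]
    split_ifs with h1 h2 h3 <;> simp_all <;> omega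

theorem pvBreakLine_snd_lt (cs : List Char) (h : cs ≠ []) :
    (pvBreakLine cs).2.length < cs.length := by
  cases cs with
  | nil => exact absurd rfl h
  | cons c r =>
    simp only [pvBreakLine]
    have := pvBreakLine_snd_le r
    split_ifs with h1 h2 h3 <;> simp_all

def pvSplitlinesKeep (cs : List Char) : List (List Char) :=
  if h : cs = [] then []
  else (pvBreakLine cs).1 :: pvSplitlinesKeep (pvBreakLine cs).2
termination_by cs.length
decreasing_by exact pvBreakLine_snd_lt cs h

-- the `while len(line) > max_len` loop of A (fuel = len(line), enough whenever 1 ≤ max_len);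
-- returns (chunks, current_lines, current_len, remaining line)
def pvWhileA (max_len : Int) :
    Nat → List Char → List (List Char) → List (List Char) → Int →
    List (List Char) × List (List Char) × Int × List Char
  | 0, line, chunks, cur, curLen => (chunks, cur, curLen, line)
  | fuel+1, line, chunks, cur, curLen =>
    if max_len < (line.length : Int) then
      let head := PySem.List.slice line none (some max_len)
      let tail := PySem.List.slice line (some max_len) none
      if cur = [] then
        pvWhileA max_len fuel tail (chunks ++ [PySem.Chars.rstrip head]) cur curLen
      else
        pvWhileA max_len fuel tail
          ((chunks ++ [PySem.Chars.rstrip cur.flatten]) ++ [PySem.Chars.rstrip head]) [] 0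
    else (chunks, cur, curLen, line)

-- the tail of A's per-line body (after the while loop)
def pvPackA (max_len : Int) (r : List (List Char) × List (List Char) × Int × List Char) :
    List (List Char) × List (List Char) × Int :=
  if r.2.1 ≠ [] ∧ max_len < r.2.2.1 + (r.2.2.2.length : Int) then
    (r.1 ++ [PySem.Chars.rstrip r.2.1.flatten], [r.2.2.2], (r.2.2.2.length : Int))
  else (r.1, r.2.1 ++ [r.2.2.2], r.2.2.1 + (r.2.2.2.length : Int))

def pvStepA (max_len : Int) (st : List (List Char) × List (List Char) × Int)
    (raw : List Char) : List (List Char) × List (List Char) × Int :=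
  pvPackA max_len (pvWhileA max_len raw.length raw st.1 st.2.1 st.2.2)

def split_message_lines_py (text : String) (max_len : Int) : List String :=
  if (PySem.Str.len text : Int) ≤ max_len then [text]
  else
    let st := (pvSplitlinesKeep text.toList).foldl (pvStepA max_len) ([], [], 0)
    (if st.2.1 = [] then st.1 else st.1 ++ [PySem.Chars.rstrip st.2.1.flatten]).map
      (fun c => String.ofList c)

-- ===== PORT B =====
-- pass 1: one line -> its ≤max_len fragments (fuel = len(line))
def pvAtoms (max_len : Int) : Nat → List Char → List (List Char)
  | 0, line => [line]
  | fuel+1, line =>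
    if max_len < (line.length : Int) then
      PySem.List.slice line none (some max_len) ::
        pvAtoms max_len fuel (PySem.List.slice line (some max_len) none)
    else [line]

-- pass 2: greedy packing of the fragments; state = (chunks, buf, buf_len)
def pvPackB (max_len : Int) (st : List (List Char) × List (List Char) × Int)
    (atom : List Char) : List (List Char) × List (List Char) × Int :=
  if st.2.1 ≠ [] ∧ max_len < st.2.2 + (atom.length : Int) then
    (st.1 ++ [PySem.Chars.rstrip st.2.1.flatten], [atom], (atom.length : Int))
  else (st.1, st.2.1 ++ [atom], st.2.2 + (atom.length : Int))

def split_message_lines_py_alt (text : String) (max_len : Int) : List String :=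
  if (PySem.Str.len text : Int) ≤ max_len then [text]
  else
    let atoms := (pvSplitlinesKeep text.toList).flatMap (fun l => pvAtoms max_len l.length l)
    let st := atoms.foldl (pvPackB max_len) ([], [], 0)
    (if st.2.1 = [] then st.1 else st.1 ++ [PySem.Chars.rstrip st.2.1.flatten]).map
      (fun c => String.ofList c)

-- ===== PRECONDITION & SPEC =====
-- A never returns when max_len ≤ 0 and text is nonempty: line[:max_len] then makes no
-- progress and the while loop runs forever. Exactly those inputs are excluded.
def Pre_split_message_lines_py (text : String) (max_len : Int) : Prop :=
  0 < max_len ∨ text = ""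
instance (text : String) (max_len : Int) : Decidable (Pre_split_message_lines_py text max_len) := by
  unfold Pre_split_message_lines_py; infer_instance

def pvWitness_split_message_lines_py : String × Int := ("ab\ncd", 3)

def Spec_split_message_lines_py (text : String) (max_len : Int) (out : List String) : Prop :=
  out = split_message_lines_py_alt text max_len
instance (text : String) (max_len : Int) (out : List String) :
    Decidable (Spec_split_message_lines_py text max_len out) := by
  unfold Spec_split_message_lines_py; infer_instance

-- ===== CLAIM (what is proved, stated in full; the proofs are below) =====
def Claim_equal_split_message_lines_py : Prop :=
  ∀ (text : String) (max_len : Int), Dom_split_message_lines_py text max_len →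
    Pre_split_message_lines_py text max_len →
    Spec_split_message_lines_py text max_len (split_message_lines_py text max_len)

-- ===== LEMMAS AND PROOFS =====

-- invariant of a pack state: buf_len is 0 on an empty buffer, ≥ 1 on a nonempty one
def pvGoodSt (st : List (List Char) × List (List Char) × Int) : Prop :=
  (st.2.1 = [] ∧ st.2.2 = 0) ∨ (st.2.1 ≠ [] ∧ 1 ≤ st.2.2)

-- A's state vs B's state: equal, or B still buffers the max_len-sized head that A
-- has already flushed to chunks
def pvRelSt (max_len : Int) (stA stB : List (List Char) × List (List Char) × Int) : Prop :=
  (stA = stB ∧ pvGoodSt stA) ∨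
  (∃ h : List Char, max_len ≤ (h.length : Int) ∧ stB.2.1 = [h] ∧ stB.2.2 = (h.length : Int) ∧
    stA.1 = stB.1 ++ [PySem.Chars.rstrip h] ∧ stA.2.1 = [] ∧ stA.2.2 = 0)

theorem pvRel_finalize (max_len : Int) (stA stB : List (List Char) × List (List Char) × Int)
    (h : pvRelSt max_len stA stB) :
    (if stA.2.1 = [] then stA.1 else stA.1 ++ [PySem.Chars.rstrip stA.2.1.flatten]) =
    (if stB.2.1 = [] then stB.1 else stB.1 ++ [PySem.Chars.rstrip stB.2.1.flatten]) := by
  rcases h with ⟨rfl, _⟩ | ⟨hd, _, hB1, _, hA1, hA2, _⟩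
  · rfl
  · rw [hA1, hB1]
    simp [hA2]

theorem pvPack_rel (max_len : Int) (line : List Char) (hline : line ≠ [])
    (stA stB : List (List Char) × List (List Char) × Int)
    (hrel : pvRelSt max_len stA stB) :
    pvRelSt max_len (pvPackA max_len (stA.1, stA.2.1, stA.2.2, line)) (pvPackB max_len stB line) := by
  have hlen : 1 ≤ (line.length : Int) := by
    have : line.length ≠ 0 := by simpa using hline
    omega
  rcases hrel with ⟨rfl, hgood⟩ | ⟨hd, hml, hB1, hB2, hA1, hA2, hA3⟩
  · by_cases hc : stA.2.1 ≠ [] ∧ max_len < stA.2.2 + (line.length : Int)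
    · left
      constructor
      · simp [pvPackA, pvPackB, hc]
      · simp only [pvPackA, if_pos hc]
        right; constructor
        · simp
        · simpa using hlen
    · left
      constructor
      · simp [pvPackA, pvPackB, hc]
      · simp only [pvPackA, if_neg hc]
        right
        rcases hgood with ⟨hb, hl⟩ | ⟨hb, hl⟩ <;> simp [hb, hl] <;> omega
  · -- deferred state: A appends line to its empty buffer, B flushes [hd] then buffers line
    have hcA : ¬ (stA.2.1 ≠ [] ∧ max_len < stA.2.2 + (line.length : Int)) := by
      simp [hA2]
    have hcB : stB.2.1 ≠ [] ∧ max_len < stB.2.2 + (line.length : Int) := by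
      constructor
      · simp [hB1]
      · rw [hB2]; omega
    left
    constructor
    · simp only [pvPackA, if_neg hcA, pvPackB, if_pos hcB]
      rw [hA1, hB1, hA2, hA3]
      simp
    · simp only [pvPackA, if_neg hcA]
      right
      constructor
      · simp [hA2]
      · rw [hA3]; simpa using hlen

theorem pvStep_rel (max_len : Int) (hml : 1 ≤ max_len) :
    ∀ (fuel : Nat) (line : List Char) (stA stB : List (List Char) × List (List Char) × Int),
      line ≠ [] → line.length ≤ fuel → pvRelSt max_len stA stB →
      pvRelSt max_len (pvPackA max_len (pvWhileA max_len fuel line stA.1 stA.2.1 stA.2.2))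
        (List.foldl (pvPackB max_len) stB (pvAtoms max_len fuel line)) := by
  intro fuel
  induction fuel with
  | zero =>
    intro line stA stB hline hfuel
    exact absurd (List.eq_nil_of_length_eq_zero (Nat.le_zero.mp hfuel)) hline
  | succ f ih =>
    intro line stA stB hline hfuel hrel
    by_cases hgt : max_len < (line.length : Int)
    · -- the while loop fires: head has exactly max_len chars, tail is nonempty
      have h0 : (0:Int) ≤ max_len := by omega
      have hheadlen : (PySem.List.slice line none (some max_len)).length = max_len.toNat := by
        rw [PySem.List.slice_to line h0]
        simp
        omega
      have hheadlenI : ((PySem.List.slice line none (some max_len)).length : Int) = max_len := by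
        rw [hheadlen]; omega
      have htaillen : (PySem.List.slice line (some max_len) none).length
          = line.length - max_len.toNat := by
        rw [PySem.List.slice_from line h0]; simp
      have htailne : PySem.List.slice line (some max_len) none ≠ [] := by
        intro hnil
        rw [hnil] at htaillen
        simp at htaillen
        omega
      have htailfuel : (PySem.List.slice line (some max_len) none).length ≤ f := by
        rw [htaillen]; omega
      -- head step preserves the relation (into the deferred shape)
      have hhead : pvRelSt max_len
          (if stA.2.1 = []
            then (stA.1 ++ [PySem.Chars.rstrip (PySem.List.slice line none (some max_len))],
                  stA.2.1, stA.2.2)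
            else ((stA.1 ++ [PySem.Chars.rstrip stA.2.1.flatten]) ++
                  [PySem.Chars.rstrip (PySem.List.slice line none (some max_len))], [], 0))
          (pvPackB max_len stB (PySem.List.slice line none (some max_len))) := by
        rcases hrel with ⟨rfl, hgood⟩ | ⟨hd, hml', hB1, hB2, hA1, hA2, hA3⟩
        · rcases hgood with ⟨hb, hl⟩ | ⟨hb, hl⟩
          · right
            refine ⟨PySem.List.slice line none (some max_len), by rw [hheadlenI], ?_, ?_, ?_, ?_, ?_⟩
            · simp [pvPackB, hb]
            · simp [pvPackB, hb, hl]
            · simp [pvPackB, hb, hl]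
            · simp [hb]
            · simp [hb, hl]
          · have hcB : stA.2.1 ≠ [] ∧
                max_len < stA.2.2 + ((PySem.List.slice line none (some max_len)).length : Int) := by
              refine ⟨hb, ?_⟩; rw [hheadlenI]; omega
            right
            refine ⟨PySem.List.slice line none (some max_len), by rw [hheadlenI], ?_, ?_, ?_, ?_, ?_⟩
            · simp [pvPackB, hcB]
            · simp [pvPackB, hcB]
            · simp [pvPackB, hcB]
            · simp [hb]
            · simp [hb]
        · have hcB : stB.2.1 ≠ [] ∧
              max_len < stB.2.2 + ((PySem.List.slice line none (some max_len)).length : Int) := by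
            refine ⟨by simp [hB1], ?_⟩
            rw [hB2, hheadlenI]
            omega
          right
          refine ⟨PySem.List.slice line none (some max_len), by rw [hheadlenI], ?_, ?_, ?_, ?_, ?_⟩
          · simp [pvPackB, hcB]
          · simp [pvPackB, hcB]
          · simp [pvPackB, hcB, hA1, hB1, hA2]
          · simp [hA2]
          · simp [hA2, hA3]
      -- unfold one iteration on both sides and use the induction hypothesis
      rw [show pvAtoms max_len (f+1) line = PySem.List.slice line none (some max_len) ::
            pvAtoms max_len f (PySem.List.slice line (some max_len) none) by
          simp [pvAtoms, hgt]]
      rw [List.foldl_cons]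
      by_cases hA : stA.2.1 = []
      · rw [show pvWhileA max_len (f+1) line stA.1 stA.2.1 stA.2.2 =
            pvWhileA max_len f (PySem.List.slice line (some max_len) none)
              (stA.1 ++ [PySem.Chars.rstrip (PySem.List.slice line none (some max_len))])
              stA.2.1 stA.2.2 by simp [pvWhileA, hgt, hA]]
        have := ih (PySem.List.slice line (some max_len) none)
          (stA.1 ++ [PySem.Chars.rstrip (PySem.List.slice line none (some max_len))],
            stA.2.1, stA.2.2)
          (pvPackB max_len stB (PySem.List.slice line none (some max_len)))
          htailne htailfuel (by simpa [hA] using hhead)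
        simpa using this
      · rw [show pvWhileA max_len (f+1) line stA.1 stA.2.1 stA.2.2 =
            pvWhileA max_len f (PySem.List.slice line (some max_len) none)
              ((stA.1 ++ [PySem.Chars.rstrip stA.2.1.flatten]) ++
                [PySem.Chars.rstrip (PySem.List.slice line none (some max_len))]) [] 0 by
            simp [pvWhileA, hgt, hA]]
        have := ih (PySem.List.slice line (some max_len) none)
          ((stA.1 ++ [PySem.Chars.rstrip stA.2.1.flatten]) ++
            [PySem.Chars.rstrip (PySem.List.slice line none (some max_len))], [], 0)
          (pvPackB max_len stB (PySem.List.slice line none (some max_len)))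
          htailne htailfuel (by simpa [hA] using hhead)
        simpa using this
    · -- the while loop does not fire: a single pack step on each side
      rw [show pvWhileA max_len (f+1) line stA.1 stA.2.1 stA.2.2 =
            (stA.1, stA.2.1, stA.2.2, line) by simp [pvWhileA, hgt]]
      rw [show pvAtoms max_len (f+1) line = [line] by simp [pvAtoms, hgt]]
      rw [List.foldl_cons, List.foldl_nil]
      exact pvPack_rel max_len line hline stA stB hrel

theorem pvLines_rel (max_len : Int) (hml : 1 ≤ max_len) :
    ∀ (lines : List (List Char)) (stA stB : List (List Char) × List (List Char) × Int),
      (∀ l ∈ lines, l ≠ []) → pvRelSt max_len stA stB →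
      pvRelSt max_len (lines.foldl (pvStepA max_len) stA)
        (List.foldl (pvPackB max_len) stB
          (lines.flatMap (fun l => pvAtoms max_len l.length l))) := by
  intro lines
  induction lines with
  | nil => intro stA stB _ hrel; simpa using hrel
  | cons l ls ih =>
    intro stA stB hne hrel
    rw [List.flatMap_cons, List.foldl_append, List.foldl_cons]
    exact ih _ _ (fun x hx => hne x (List.mem_cons_of_mem l hx))
      (pvStep_rel max_len hml l.length l stA stB (hne l (by simp)) le_rfl hrel)

theorem pvBreakLine_fst_ne (cs : List Char) (h : cs ≠ []) : (pvBreakLine cs).1 ≠ [] := by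
  cases cs with
  | nil => exact absurd rfl h
  | cons c r =>
    simp only [pvBreakLine]
    split_ifs <;> simp

theorem pvSplitlinesKeep_ne : ∀ (cs : List Char), ∀ l ∈ pvSplitlinesKeep cs, l ≠ [] := by
  intro cs
  induction cs using pvSplitlinesKeep.induct with
  | case1 => simp [pvSplitlinesKeep]
  | case2 cs hcs ih =>
    rw [pvSplitlinesKeep, dif_neg hcs]
    intro l hl
    rcases List.mem_cons.mp hl with rfl | hl
    · exact pvBreakLine_fst_ne cs hcs
    · exact ih l hl

-- ===== VERDICT (by name: the statement is the Claim_ definition above) =====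
theorem split_message_lines_py_spec : Claim_equal_split_message_lines_py := by
  intro text max_len _hdom hpre
  unfold Spec_split_message_lines_py split_message_lines_py split_message_lines_py_alt
  by_cases hg : (PySem.Str.len text : Int) ≤ max_len
  · rw [if_pos hg, if_pos hg]
  · rw [if_neg hg, if_neg hg]
    rcases hpre with hml | rfl
    · have hrel := pvLines_rel max_len (by omega) (pvSplitlinesKeep text.toList)
        ([], [], 0) ([], [], 0) (pvSplitlinesKeep_ne text.toList)
        (Or.inl ⟨rfl, Or.inl ⟨rfl, rfl⟩⟩)
      have := pvRel_finalize max_len _ _ hrel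
      simp only []
      rw [this]
    · -- text = "": the guard failed, so the folds run over no lines on both sides
      have hempty : pvSplitlinesKeep ([] : List Char) = [] := by
        rw [pvSplitlinesKeep]
        simp
      simp [hempty]
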